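-- pv_equiv track=rewrite | github.com/ValentinaSchaab/TP1 | veintidos.py | fuerza
-- ===== SOURCE A (Python) =====
-- def fuerza(mochila, objetos_sacados=0):
--
--     if not mochila:
--         return False, objetos_sacados
--
--     objeto = mochila.pop(0)
--     objetos_sacados += 1
--
--     if objeto == "sable de luz":
--         return True, objetos_sacados
--     else:
--         return fuerza(mochila, objetos_sacados)
-- ===== SOURCE B (Python) =====
-- def fuerza(mochila, objetos_sacados=0):
--     try:
--         i = mochila.index("sable de luz")
--     except ValueError:
--         objetos_sacados += len(mochila)
--         mochila.clear()
--         return False, objetos_sacados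
--     del mochila[:i + 1]
--     return True, objetos_sacados + i + 1
-- ===== Notes on version B (the rewrite author's own statement) =====
-- stated objective: alternative
-- what changed: Replaces the tail recursion that pops and compares one element per call with a single list.index search plus arithmetic on the found position (one slice deletion preserves the same consumption of the list).
import Mathlib
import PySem

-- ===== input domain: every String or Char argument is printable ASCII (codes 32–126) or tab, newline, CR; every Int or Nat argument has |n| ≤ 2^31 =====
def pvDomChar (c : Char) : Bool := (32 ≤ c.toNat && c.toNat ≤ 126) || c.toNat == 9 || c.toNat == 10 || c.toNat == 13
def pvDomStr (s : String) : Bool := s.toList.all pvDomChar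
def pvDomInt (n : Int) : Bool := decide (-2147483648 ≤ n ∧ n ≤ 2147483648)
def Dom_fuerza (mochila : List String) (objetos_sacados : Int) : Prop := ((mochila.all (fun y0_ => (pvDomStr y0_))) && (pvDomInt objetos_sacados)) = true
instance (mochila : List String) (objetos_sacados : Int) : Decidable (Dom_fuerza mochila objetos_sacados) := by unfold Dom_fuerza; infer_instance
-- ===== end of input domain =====

-- ===== PORT A =====
-- B searches with list.index instead of A's pop-one-per-call tail recursion; mutation of the list is identical.
def fuerza (mochila : List String) (objetos_sacados : Int) : Bool × Int :=
  match mochila with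
  | [] => (false, objetos_sacados)
  | objeto :: rest =>
    let objetos_sacados := objetos_sacados + 1
    if objeto = "sable de luz" then (true, objetos_sacados)
    else fuerza rest objetos_sacados

-- ===== PORT B =====
def fuerza_alt (mochila : List String) (objetos_sacados : Int) : Bool × Int :=
  match PySem.List.index? mochila "sable de luz" with
  | none => (false, objetos_sacados + mochila.length)
  | some i => (true, objetos_sacados + (i : Int) + 1)

-- ===== PRECONDITION & SPEC =====
def Spec_fuerza (mochila : List String) (objetos_sacados : Int) (out : Bool × Int) : Prop := out = fuerza_alt mochila objetos_sacados
instance (mochila : List String) (objetos_sacados : Int) (out : Bool × Int) : Decidable (Spec_fuerza mochila objetos_sacados out) := by unfold Spec_fuerza; infer_instance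

-- ===== CLAIM (what is proved, stated in full; the proofs are below) =====
def Claim_equal_fuerza : Prop := ∀ (mochila : List String) (objetos_sacados : Int), Dom_fuerza mochila objetos_sacados → Spec_fuerza mochila objetos_sacados (fuerza mochila objetos_sacados)

-- ===== LEMMAS AND PROOFS =====

-- ===== VERDICT (by name: the statement is the Claim_ definition above) =====
theorem fuerza_agrees (mochila : List String) (objetos_sacados : Int) :
    fuerza mochila objetos_sacados = fuerza_alt mochila objetos_sacados := by
  induction mochila generalizing objetos_sacados with
  | nil => simp [fuerza, fuerza_alt, PySem.List.index?]
  | cons x rest ih =>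
    by_cases hx : x = "sable de luz"
    · subst hx
      simp [fuerza, fuerza_alt, PySem.List.index?_eq_idxOf?, List.idxOf?_cons]
    · rw [fuerza_alt, PySem.List.index?_cons_of_ne rest hx]
      simp only [fuerza, if_neg hx, ih]
      rw [fuerza_alt]
      cases h : PySem.List.index? rest "sable de luz" with
      | none => simp [h]; ring
      | some i => simp [h]; ring

theorem fuerza_spec : Claim_equal_fuerza := by
  intro mochila objetos_sacados _
  unfold Spec_fuerza
  exact fuerza_agrees mochila objetos_sacados
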